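-- pv_equiv track=rewrite | github.com/lzq114514/Pangenome-Graph-Annotation-PGA-pipeline | ncbi.py | find_other_boundary
-- ===== SOURCE A (Python) =====
-- def find_other_boundary(lines):
--     for i, ln in enumerate(lines):
--         if ln.startswith("#") and ln.lstrip("#").strip().lower().startswith("other"):
--             return i
--     for i, ln in enumerate(lines):
--         if ln.startswith("#"):
--             continue
--         c = ln.rstrip("\n").split("\t")
--         if len(c) >= 3 and c[2].lower() == "other":
--             return i
--     return None
-- ===== SOURCE B (Python) =====
-- def find_other_boundary(lines):
--     col_idx = None
--     for i, ln in enumerate(lines):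
--         if ln.startswith("#"):
--             if ln.lstrip("#").strip().lower().startswith("other"):
--                 return i
--         elif col_idx is None:
--             c = ln.rstrip("\n").split("\t")
--             if len(c) >= 3 and c[2].lower() == "other":
--                 col_idx = i
--     return col_idx
-- ===== Notes on version B (the rewrite author's own statement) =====
-- stated objective: simpler
-- what changed: A's two priority-ordered passes over lines are merged into one pass that returns immediately on a '#other' comment and records the first column match as a fallback returned after the loop.
import Mathlib
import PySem

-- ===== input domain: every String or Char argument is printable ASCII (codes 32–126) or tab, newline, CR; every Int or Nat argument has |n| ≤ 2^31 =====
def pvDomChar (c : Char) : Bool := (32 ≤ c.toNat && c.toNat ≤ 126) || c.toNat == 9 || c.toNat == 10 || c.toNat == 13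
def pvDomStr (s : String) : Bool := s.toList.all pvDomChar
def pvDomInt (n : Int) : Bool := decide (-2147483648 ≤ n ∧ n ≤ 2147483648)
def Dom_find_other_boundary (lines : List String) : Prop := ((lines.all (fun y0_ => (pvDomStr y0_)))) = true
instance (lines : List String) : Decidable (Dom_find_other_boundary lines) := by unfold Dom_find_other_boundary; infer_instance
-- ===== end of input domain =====

-- B merges A's two priority-ordered passes into one pass with a fallback variable; return value equivalence, no side effects involved.

-- shared string predicates (identical expressions in both Pythons)
-- ln.lstrip("#").strip().lower().startswith("other"); lstrip("#") is ported by hand as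
-- dropWhile (· == '#'), which is exact for the one-character strip set.
def pvOtherComment (ln : String) : Bool :=
  PySem.Chars.startswith
    (PySem.Chars.lower (PySem.Chars.strip (ln.toList.dropWhile (· == '#'))))
    ['o','t','h','e','r']

-- ln.rstrip("\n").split("\t"); rstrip("\n") is ported by hand as reverse-dropWhile-reverse,
-- exact for the one-character strip set; len(c) >= 3 and c[2].lower() == "other".
def pvColOther (ln : String) : Bool :=
  let c := PySem.Chars.splitOn ((ln.toList.reverse.dropWhile (· == '\n')).reverse) ['\t']
  decide (3 ≤ c.length) &&
    ((PySem.List.pyGet? c 2).map PySem.Chars.lower == some ['o','t','h','e','r'])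

-- ===== PORT A =====
-- first pass: first '#other' comment line
def pvA1 : List String → Int → Option Int
  | [], _ => none
  | ln :: rest, i =>
    if PySem.Str.startswith ln "#" && pvOtherComment ln then some i else pvA1 rest (i + 1)

-- second pass: first non-comment line whose third tab column is 'other'
def pvA2 : List String → Int → Option Int
  | [], _ => none
  | ln :: rest, i =>
    if PySem.Str.startswith ln "#" then pvA2 rest (i + 1)
    else if pvColOther ln then some i else pvA2 rest (i + 1)

def find_other_boundary (lines : List String) : Option Int :=
  match pvA1 lines 0 with
  | some i => some i
  | none => pvA2 lines 0

-- ===== PORT B =====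
-- single pass with fallback col_idx
def pvB : List String → Int → Option Int → Option Int
  | [], _, col => col
  | ln :: rest, i, col =>
    if PySem.Str.startswith ln "#" then
      if pvOtherComment ln then some i else pvB rest (i + 1) col
    else if col.isNone then
      if pvColOther ln then pvB rest (i + 1) (some i) else pvB rest (i + 1) col
    else pvB rest (i + 1) col

def find_other_boundary_alt (lines : List String) : Option Int :=
  pvB lines 0 none

-- ===== PRECONDITION & SPEC =====
def Spec_find_other_boundary (lines : List String) (out : Option Int) : Prop := out = find_other_boundary_alt lines
instance (lines : List String) (out : Option Int) : Decidable (Spec_find_other_boundary lines out) := by unfold Spec_find_other_boundary; infer_instance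

-- ===== CLAIM (what is proved, stated in full; the proofs are below) =====
def Claim_equal_find_other_boundary : Prop := ∀ (lines : List String), Dom_find_other_boundary lines → Spec_find_other_boundary lines (find_other_boundary lines)

-- ===== LEMMAS AND PROOFS =====
-- Loop invariant: the single pass with fallback col equals "first pass result, else col, else second pass result".
theorem pvB_eq (lines : List String) : ∀ (i : Int) (col : Option Int),
    pvB lines i col = (pvA1 lines i).or (col.or (pvA2 lines i)) := by
  induction lines with
  | nil => intro i col; simp [pvB, pvA1, pvA2]
  | cons ln rest ih =>
    intro i col
    by_cases hc : PySem.Chars.startswith ln.toList ['#'] = true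
    · by_cases ho : pvOtherComment ln = true
      · simp [pvB, pvA1, hc, ho]
      · simp [pvB, pvA1, pvA2, hc, ho, ih]
    · by_cases hcol : pvColOther ln = true
      · cases col with
        | none => simp [pvB, pvA1, pvA2, hc, hcol, ih]
        | some c => simp [pvB, pvA1, pvA2, hc, hcol, ih]
      · cases col with
        | none => simp [pvB, pvA1, pvA2, hc, hcol, ih]
        | some c => simp [pvB, pvA1, pvA2, hc, hcol, ih]

-- ===== VERDICT (by name: the statement is the Claim_ definition above) =====
theorem find_other_boundary_spec : Claim_equal_find_other_boundary := by
  intro lines _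
  unfold Spec_find_other_boundary find_other_boundary find_other_boundary_alt
  rw [pvB_eq]
  cases pvA1 lines 0 <;> simp [Option.or]
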